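-- pv_equiv track=rewrite | github.com/wangannie/advent-of-code | 2020/03.py | part2
-- ===== SOURCE A (Python) =====
-- def count_trees(rows, right, down):
--     width = len(rows[0])
--     x, trees = 0, 0
--     for i in range(0, len(rows), down):
--         if rows[i][x % width] == '#':
--             trees += 1
--         x += right
--     return trees
--
-- def part2(data):
--     rows = [n for n in data.splitlines()]
--     r1 = count_trees(rows, 1, 1)
--     r2 = count_trees(rows, 3, 1)
--     r3 = count_trees(rows, 5, 1)
--     r4 = count_trees(rows, 7, 1)
--     r5 = count_trees(rows, 1, 2)
--     return r1 * r2 * r3 * r4 * r5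
-- ===== SOURCE B (Python) =====
-- def part2(data):
--     rows = data.splitlines()
--     width = len(rows[0])
--     c1 = c2 = c3 = c4 = c5 = 0
--     for i, row in enumerate(rows):
--         cols = {j for j, ch in enumerate(row) if ch == '#'}
--         c1 += (i * 1) % width in cols
--         c2 += (i * 3) % width in cols
--         c3 += (i * 5) % width in cols
--         c4 += (i * 7) % width in cols
--         c5 += i % 2 == 0 and (i // 2) % width in cols
--     return c1 * c2 * c3 * c4 * c5
-- ===== Notes on version B (the rewrite author's own statement) =====
-- stated objective: alternative
-- what changed: B makes a single pass over the rows maintaining all five slope counters simultaneously, testing each slope's hit by membership of its computed column in a per-row set of tree columns, instead of A's five separate passes each threading a running x accumulator and indexing into the row string.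
import Mathlib
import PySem

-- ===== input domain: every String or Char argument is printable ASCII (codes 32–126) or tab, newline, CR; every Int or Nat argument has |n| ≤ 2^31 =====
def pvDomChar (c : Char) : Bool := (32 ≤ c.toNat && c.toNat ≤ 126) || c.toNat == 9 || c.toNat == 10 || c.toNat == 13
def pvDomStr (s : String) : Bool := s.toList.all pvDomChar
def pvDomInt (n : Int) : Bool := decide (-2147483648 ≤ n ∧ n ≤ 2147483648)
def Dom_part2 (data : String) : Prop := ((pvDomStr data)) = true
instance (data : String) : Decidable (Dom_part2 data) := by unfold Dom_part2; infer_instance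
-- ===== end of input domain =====

-- B makes a single pass over the rows maintaining all five slope counters at once, testing each
-- slope's hit by membership of its computed column in a per-row set of tree columns, instead of
-- A's five separate passes each threading a running x accumulator (objective: alternative).


-- ===== PORT A =====
def countTrees (rows : List String) (right down : Int) : Int :=
  let width : Int := PySem.Str.len ((PySem.List.pyGet? rows 0).getD "")
  ((PySem.List.pyRange 0 rows.length down).foldl
    (fun (st : Int × Int) i =>
      (st.1 + right,
       if PySem.Str.pyGet? ((PySem.List.pyGet? rows i).getD "") (PySem.Int.mod st.1 width) = some '#'
       then st.2 + 1 else st.2))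
    (0, 0)).2

def part2 (data : String) : Int :=
  let rows := (PySem.Str.splitlines data).map (fun n => n)
  let r1 := countTrees rows 1 1
  let r2 := countTrees rows 3 1
  let r3 := countTrees rows 5 1
  let r4 := countTrees rows 7 1
  let r5 := countTrees rows 1 2
  r1 * r2 * r3 * r4 * r5

-- ===== PORT B =====
-- {j for j, ch in enumerate(row) if ch == '#'}
def treeCols (row : String) : PySem.Set Int :=
  PySem.Set.ofList (((PySem.List.enumerate row.toList 0).filter (fun p => p.2 == '#')).map (fun p => p.1))

def part2_alt (data : String) : Int :=
  let rows := PySem.Str.splitlines data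
  let width : Int := PySem.Str.len ((PySem.List.pyGet? rows 0).getD "")
  let c := (PySem.List.enumerate rows 0).foldl
    (fun (c : Int × Int × Int × Int × Int) p =>
      let cols := treeCols p.2
      (c.1 + (if PySem.Set.contains cols (PySem.Int.mod (p.1 * 1) width) then 1 else 0),
       c.2.1 + (if PySem.Set.contains cols (PySem.Int.mod (p.1 * 3) width) then 1 else 0),
       c.2.2.1 + (if PySem.Set.contains cols (PySem.Int.mod (p.1 * 5) width) then 1 else 0),
       c.2.2.2.1 + (if PySem.Set.contains cols (PySem.Int.mod (p.1 * 7) width) then 1 else 0),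
       c.2.2.2.2 + (if PySem.Int.mod p.1 2 == 0 && PySem.Set.contains cols (PySem.Int.mod (PySem.Int.floordiv p.1 2) width) then 1 else 0)))
    (0, 0, 0, 0, 0)
  c.1 * c.2.1 * c.2.2.1 * c.2.2.2.1 * c.2.2.2.2

-- ===== PRECONDITION & SPEC =====
-- Pre_ is exactly where Python A returns: a non-empty grid with a non-empty first row
-- and every cell visited by one of the five slopes inside its (possibly ragged) row.
def Pre_part2 (data : String) : Prop :=
  PySem.Str.splitlines data ≠ [] ∧
  0 < PySem.Str.len (((PySem.Str.splitlines data).head?).getD "") ∧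
  ∀ p ∈ [((1:Nat),(1:Nat)), (3,1), (5,1), (7,1), (1,2)],
    ∀ k, k < (PySem.Str.splitlines data).length →
      p.2 * k < (PySem.Str.splitlines data).length →
      (k * p.1) % PySem.Str.len (((PySem.Str.splitlines data).head?).getD "") <
        PySem.Str.len ((PySem.Str.splitlines data).getD (p.2 * k) "")
instance (data : String) : Decidable (Pre_part2 data) := by unfold Pre_part2; infer_instance

def pvWitness_part2 : String := "#.\n.#"

def Spec_part2 (data : String) (out : Int) : Prop := out = part2_alt data
instance (data : String) (out : Int) : Decidable (Spec_part2 data out) := by unfold Spec_part2; infer_instance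

-- ===== CLAIM (what is proved, stated in full; the proofs are below) =====
def Claim_equal_part2 : Prop := ∀ (data : String), Dom_part2 data → Pre_part2 data → Spec_part2 data (part2 data)

-- ===== LEMMAS AND PROOFS =====

-- A-side characterisation: the accumulator-threading fold as a closed-index sum.
def countSpec (rows : List String) (width right down : Int) : Int :=
  ((PySem.List.enumerate (PySem.List.pyRange 0 rows.length down) 0).map
    (fun ki =>
      if PySem.Str.pyGet? ((PySem.List.pyGet? rows ki.2).getD "") (PySem.Int.mod (ki.1 * right) width) = some '#'
      then (1 : Int) else 0)).sum

theorem foldl_trees (rows : List String) (width right : Int) (idxs : List Int) (s x0 t0 : Int) :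
    (idxs.foldl
      (fun (st : Int × Int) i =>
        (st.1 + right,
         if PySem.Str.pyGet? ((PySem.List.pyGet? rows i).getD "") (PySem.Int.mod st.1 width) = some '#'
         then st.2 + 1 else st.2))
      (x0, t0)).2
    = t0 + ((PySem.List.enumerate idxs s).map
        (fun ki =>
          if PySem.Str.pyGet? ((PySem.List.pyGet? rows ki.2).getD "") (PySem.Int.mod (x0 + (ki.1 - s) * right) width) = some '#'
          then (1 : Int) else 0)).sum := by
  induction idxs generalizing s x0 t0 with
  | nil => simp [PySem.List.enumerate]
  | cons i is ih =>
    simp only [List.foldl_cons, PySem.List.enumerate_cons, List.map_cons, List.sum_cons]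
    rw [ih (s + 1)]
    have h0 : x0 + (s - s) * right = x0 := by ring
    have harg : ∀ a : Int, x0 + right + (a - (s + 1)) * right = x0 + (a - s) * right := by
      intro a; ring
    simp only [h0, harg]
    split_ifs <;> ring

theorem count_eq_spec (rows : List String) (right down : Int) :
    countTrees rows right down
      = countSpec rows (PySem.Str.len ((PySem.List.pyGet? rows 0).getD "")) right down := by
  unfold countTrees countSpec
  rw [foldl_trees rows _ right _ 0 0 0]
  have harg : ∀ a : Int, 0 + (a - 0) * right = a * right := by intro a; ring
  simp only [harg, zero_add]


theorem enum_ranges {α : Type} (xs : List α) (d : α) : ∀ (s : Int),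
    PySem.List.enumerate xs s = (List.range xs.length).map (fun (k : Nat) => (s + (k:Int), xs.getD k d)) := by
  induction xs with
  | nil => intro s; simp [PySem.List.enumerate_nil]
  | cons x xs ih =>
    intro s
    rw [PySem.List.enumerate_cons, ih (s+1), List.length_cons, List.range_succ_eq_map]
    simp only [List.map_cons, List.map_map, List.getD_cons_zero]
    refine List.cons_eq_cons.mpr ⟨by simp, ?_⟩
    apply List.map_congr_left
    intro k _
    simp only [Function.comp_apply, List.getD_cons_succ]
    refine Prod.ext ?_ rfl
    push_cast
    ring

theorem contains_treeCols (row : String) (e : Nat) :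
    PySem.Set.contains (treeCols row) ((e:Nat):Int) = true ↔ row.toList[e]? = some '#' := by
  rw [PySem.Set.contains_iff]
  unfold treeCols
  rw [PySem.Set.mem_ofList]
  simp only [List.mem_map, List.mem_filter, PySem.List.mem_enumerate_iff]
  constructor
  · rintro ⟨p, ⟨⟨k, hk, rfl⟩, hq⟩, he⟩
    simp only [beq_iff_eq] at hq
    simp only [zero_add, Int.natCast_inj] at he
    have : k = e := by exact_mod_cast he
    subst this
    rw [List.getElem?_eq_getElem hk, hq]
  · intro h
    have hk : e < row.toList.length := by
      by_contra hc
      simp [List.getElem?_eq_none (by omega : row.toList.length ≤ e)] at h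
    refine ⟨((e:Int), row.toList[e]), ⟨⟨e, hk, by simp⟩, ?_⟩, rfl⟩
    rw [List.getElem?_eq_getElem hk] at h
    simpa using Option.some.inj h

theorem sum_even_halves (F : Nat → Int) : ∀ (m : Nat),
    ((List.range m).map (fun k => if k % 2 = 0 then F (k/2) else 0)).sum
      = ((List.range ((m+1)/2)).map F).sum := by
  intro m
  induction m with
  | zero => simp
  | succ m ih =>
    rw [List.range_succ, List.map_append, List.sum_append, ih]
    rcases Nat.even_or_odd m with he | ho
    · obtain ⟨t, rfl⟩ := he
      have h1 : (t + t + 1 + 1) / 2 = (t + t + 1) / 2 + 1 := by omega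
      rw [h1, List.range_succ, List.map_append, List.sum_append]
      have h2 : (t + t) % 2 = 0 := by omega
      have h3 : (t + t) / 2 = t := by omega
      have h4 : (t + t + 1) / 2 = t := by omega
      simp [h2, h3, h4]
    · obtain ⟨t, rfl⟩ := ho
      have h2 : (2*t + 1) % 2 = 1 := by omega
      simp [h2]
      have h3 : (2 * t + 1 + 1) / 2 = (2 * t + 1 + 1 + 1) / 2 := by omega
      rw [h3]

theorem foldl_five {α : Type} (f1 f2 f3 f4 f5 : α → Int) : ∀ (l : List α) (a b c d e : Int),
    (l.foldl (fun (st : Int × Int × Int × Int × Int) p =>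
        (st.1 + f1 p, st.2.1 + f2 p, st.2.2.1 + f3 p, st.2.2.2.1 + f4 p, st.2.2.2.2 + f5 p))
      (a, b, c, d, e))
    = (a + (l.map f1).sum, b + (l.map f2).sum, c + (l.map f3).sum, d + (l.map f4).sum, e + (l.map f5).sum) := by
  intro l
  induction l with
  | nil => intro a b c d e; simp
  | cons x xs ih =>
    intro a b c d e
    rw [List.foldl_cons, ih]
    simp only [List.map_cons, List.sum_cons]
    refine Prod.ext (by ring) (Prod.ext (by ring) (Prod.ext (by ring) (Prod.ext (by ring) (by ring))))


theorem hit_ind (row : String) (e : Nat) :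
    (if PySem.Str.pyGet? row ((e:Nat):Int) = some '#' then (1:Int) else 0)
      = (if PySem.Set.contains (treeCols row) ((e:Nat):Int) = true then 1 else 0) := by
  rw [PySem.Str.pyGet?_natCast]
  by_cases h : row.toList[e]? = some '#'
  · rw [if_pos h, if_pos ((contains_treeCols row e).mpr h)]
  · rw [if_neg h, if_neg (fun hc => h ((contains_treeCols row e).mp hc))]

theorem slope_eq1 (rows : List String) (w r : Nat) :
    countSpec rows (w:Int) (r:Int) 1
      = ((PySem.List.enumerate rows 0).map
          (fun p => if PySem.Set.contains (treeCols p.2) (PySem.Int.mod (p.1 * (r:Int)) (w:Int)) = true then (1:Int) else 0)).sum := by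
  unfold countSpec
  have hlen : (PySem.List.pyRange 0 (rows.length:Int) 1).length = rows.length := by
    rw [PySem.List.length_pyRange_one]; omega
  rw [enum_ranges _ (0:Int) 0, enum_ranges rows "" 0, List.map_map, List.map_map, hlen]
  refine congrArg List.sum (List.map_congr_left (fun k hk => ?_))
  rw [List.mem_range] at hk
  simp only [Function.comp_apply]
  have hgetd : (PySem.List.pyRange 0 (rows.length:Int) 1).getD k 0 = (k:Int) := by
    rw [List.getD_eq_getElem _ _ (by rw [hlen]; exact hk), PySem.List.getElem_pyRange_one]
    simp
  have hrow : (PySem.List.pyGet? rows ((k:Nat):Int)).getD "" = rows.getD k "" := by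
    rw [PySem.List.pyGet?_natCast, List.getElem?_eq_getElem hk, Option.getD_some,
      List.getD_eq_getElem _ _ hk]
  rw [hgetd]
  simp only [zero_add]
  rw [hrow]
  have hcast : (k:Int) * (r:Int) = ((k*r : Nat) : Int) := by push_cast; ring
  rw [hcast, PySem.Int.mod_natCast]
  exact hit_ind (rows.getD k "") ((k*r) % w)

theorem slope_eq2 (rows : List String) (w : Nat) :
    countSpec rows (w:Int) 1 2
      = ((PySem.List.enumerate rows 0).map
          (fun p => if (PySem.Int.mod p.1 2 == 0 &&
              PySem.Set.contains (treeCols p.2) (PySem.Int.mod (PySem.Int.floordiv p.1 2) (w:Int))) = true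
            then (1:Int) else 0)).sum := by
  unfold countSpec
  have hq : PySem.List.pyRange 0 (rows.length:Int) 2
      = (List.range ((rows.length+1)/2)).map (fun (k:Nat) => ((2*k : Nat):Int)) := by
    rw [PySem.List.pyRange_of_pos 0 _ (by norm_num)]
    have hn : (if (0:Int) < (rows.length:Int) then (((rows.length:Int) - 0 + 2 - 1)/2).toNat else 0)
        = (rows.length+1)/2 := by
      split <;> omega
    rw [hn]
    apply List.map_congr_left
    intro k _
    push_cast
    ring
  have hlen : ((List.range ((rows.length+1)/2)).map (fun (k:Nat) => ((2*k : Nat):Int))).length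
      = (rows.length+1)/2 := by simp
  rw [hq, enum_ranges _ (0:Int) 0, List.map_map, hlen]
  -- A side is now a sum over range ((m+1)/2)
  have hA : ∀ k ∈ List.range ((rows.length+1)/2),
      ((fun ki => if PySem.Str.pyGet? ((PySem.List.pyGet? rows ki.2).getD "")
            (PySem.Int.mod (ki.1 * 1) (w:Int)) = some '#' then (1:Int) else 0) ∘
        (fun (k:Nat) => ((0:Int) + (k:Int),
          ((List.range ((rows.length+1)/2)).map (fun (k:Nat) => ((2*k : Nat):Int))).getD k 0))) k
      = (fun (j:Nat) => if PySem.Set.contains (treeCols (rows.getD (2*j) ""))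
            (((j % w : Nat)):Int) = true then (1:Int) else 0) k := by
    intro k hk
    rw [List.mem_range] at hk
    simp only [Function.comp_apply]
    have hgetd : ((List.range ((rows.length+1)/2)).map (fun (k:Nat) => ((2*k : Nat):Int))).getD k 0
        = ((2*k : Nat):Int) := by
      rw [List.getD_eq_getElem _ _ (by simpa using hk)]
      simp
    have h2k : 2*k < rows.length := by omega
    have hrow : (PySem.List.pyGet? rows ((2*k:Nat):Int)).getD "" = rows.getD (2*k) "" := by
      rw [PySem.List.pyGet?_natCast, List.getElem?_eq_getElem h2k, Option.getD_some,
        List.getD_eq_getElem _ _ h2k]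
    rw [hgetd, hrow]
    have hcast : ((0:Int) + (k:Int)) * 1 = ((k:Nat):Int) := by ring
    rw [hcast, PySem.Int.mod_natCast]
    exact hit_ind (rows.getD (2*k) "") (k % w)
  rw [List.map_congr_left hA]
  -- B side
  rw [enum_ranges rows "" 0, List.map_map]
  have hB : ∀ i ∈ List.range rows.length,
      ((fun p => if (PySem.Int.mod p.1 2 == 0 &&
              PySem.Set.contains (treeCols p.2) (PySem.Int.mod (PySem.Int.floordiv p.1 2) (w:Int))) = true
            then (1:Int) else 0) ∘
        (fun (k:Nat) => ((0:Int) + (k:Int), rows.getD k ""))) i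
      = (fun (i:Nat) => if i % 2 = 0
          then (fun (j:Nat) => if PySem.Set.contains (treeCols (rows.getD (2*j) ""))
              (((j % w : Nat)):Int) = true then (1:Int) else 0) (i/2)
          else 0) i := by
    intro i _
    simp only [Function.comp_apply, zero_add]
    have hmod : PySem.Int.mod ((i:Nat):Int) 2 = ((i % 2 : Nat):Int) := by
      exact_mod_cast PySem.Int.mod_natCast i 2
    have hdiv : PySem.Int.floordiv ((i:Nat):Int) 2 = ((i / 2 : Nat):Int) := by
      exact_mod_cast PySem.Int.floordiv_natCast i 2
    rw [hmod, hdiv]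
    by_cases hpar : i % 2 = 0
    · have h2 : 2 * (i / 2) = i := by omega
      have hdd : PySem.Int.mod ((i/2 : Nat):Int) (w:Int) = (((i/2) % w : Nat):Int) :=
        PySem.Int.mod_natCast (i/2) w
      simp only [hpar, hdd]
      simp only [Nat.cast_zero, beq_self_eq_true, Bool.true_and]
      rw [h2]
      simp
    · have hne : (((i % 2 : Nat):Int) == 0) = false := by
        simp only [beq_eq_false_iff_ne, ne_eq]
        exact_mod_cast hpar
      simp only [hne, Bool.false_and, Bool.false_eq_true, if_false, if_neg hpar]
  rw [List.map_congr_left hB,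
    sum_even_halves (fun (j:Nat) => if PySem.Set.contains (treeCols (rows.getD (2*j) ""))
      (((j % w : Nat)):Int) = true then (1:Int) else 0)]

theorem part2_total (data : String) : part2 data = part2_alt data := by
  simp only [part2, part2_alt, List.map_id']
  rw [count_eq_spec, count_eq_spec, count_eq_spec, count_eq_spec, count_eq_spec]
  rw [foldl_five]
  simp only [PySem.Str.len_eq]
  have h1 := slope_eq1 (PySem.Str.splitlines data) ((PySem.List.pyGet? (PySem.Str.splitlines data) 0).getD "").toList.length 1
  have h3 := slope_eq1 (PySem.Str.splitlines data) ((PySem.List.pyGet? (PySem.Str.splitlines data) 0).getD "").toList.length 3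
  have h5 := slope_eq1 (PySem.Str.splitlines data) ((PySem.List.pyGet? (PySem.Str.splitlines data) 0).getD "").toList.length 5
  have h7 := slope_eq1 (PySem.Str.splitlines data) ((PySem.List.pyGet? (PySem.Str.splitlines data) 0).getD "").toList.length 7
  have hs2 := slope_eq2 (PySem.Str.splitlines data) ((PySem.List.pyGet? (PySem.Str.splitlines data) 0).getD "").toList.length
  simp only [Nat.cast_one, Nat.cast_ofNat] at h1 h3 h5 h7 hs2
  rw [h1, h3, h5, h7, hs2]
  simp only [zero_add]
  rfl

-- ===== VERDICT (by name: the statement is the Claim_ definition above) =====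
theorem part2_spec : Claim_equal_part2 := by
  intro data _ _
  exact part2_total data
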